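-- pv_equiv track=rewrite | github.com/PrashantSaroj/AdventOfCode | 2022/day8/part2.py | nlv_u
-- ===== SOURCE A (Python) =====
-- def nlv_u(tree_mat, c_j, col_size):
--     P = [-1 for _ in range(col_size)]
--     for i in range(col_size):
--         j = i-1
--         while j >= 0 and tree_mat[j][c_j] < tree_mat[i][c_j]:
--             j = P[j]
--         P[i] = j
--     return P
-- ===== SOURCE B (Python) =====
-- def nlv_u(tree_mat, c_j, col_size):
--     P = []
--     stack = []
--     for i in range(col_size):
--         while stack and tree_mat[stack[-1]][c_j] < tree_mat[i][c_j]: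
--             stack.pop()
--         P.append(stack[-1] if stack else -1)
--         stack.append(i)
--     return P
-- ===== Notes on version B (the rewrite author's own statement) =====
-- stated objective: idiomatic
-- what changed: Replaces A's pointer-jumping chain through the partially built answer array with the textbook monotonic-stack scan (pop while strictly smaller, peek, push).
import Mathlib
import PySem

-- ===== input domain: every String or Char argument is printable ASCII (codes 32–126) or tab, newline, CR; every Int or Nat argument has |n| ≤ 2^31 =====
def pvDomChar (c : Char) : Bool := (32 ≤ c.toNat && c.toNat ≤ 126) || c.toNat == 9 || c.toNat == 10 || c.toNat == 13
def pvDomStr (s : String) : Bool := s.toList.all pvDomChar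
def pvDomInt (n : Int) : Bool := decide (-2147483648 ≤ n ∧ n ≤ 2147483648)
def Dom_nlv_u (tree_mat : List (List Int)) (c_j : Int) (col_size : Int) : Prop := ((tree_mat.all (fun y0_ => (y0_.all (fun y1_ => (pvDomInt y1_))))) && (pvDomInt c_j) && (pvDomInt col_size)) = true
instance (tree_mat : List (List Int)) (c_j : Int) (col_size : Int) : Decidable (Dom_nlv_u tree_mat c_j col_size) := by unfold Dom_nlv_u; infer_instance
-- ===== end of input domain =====

-- B replaces A's pointer-jumping chain with the textbook monotonic-stack scan; same return value.


-- ===== PORT A =====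
-- tree_mat[j][c_j]: total form, exact under Pre_ (all indices A reads are in range there)
def pvVal (tree_mat : List (List Int)) (c_j j : Int) : Int :=
  PySem.List.pyGetD (PySem.List.pyGetD tree_mat j []) c_j 0

-- A's inner 'while j >= 0 and tree_mat[j][c_j] < tree_mat[i][c_j]: j = P[j]', fuel-bounded
-- (the fuel only makes the recursion total; the chain from i-1 has at most i links, so fuel i.toNat never runs out)
def pvChase (tree_mat : List (List Int)) (c_j : Int) (P : List Int) (vi : Int) : Nat → Int → Int
  | 0, j => j
  | fuel+1, j =>
      if 0 ≤ j ∧ pvVal tree_mat c_j j < vi then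
        pvChase tree_mat c_j P vi fuel (PySem.List.pyGetD P j 0)
      else j

def nlv_u (tree_mat : List (List Int)) (c_j : Int) (col_size : Int) : List Int :=
  let P0 := (PySem.List.pyRange 0 col_size 1).map (fun _ => (-1 : Int))
  (PySem.List.pyRange 0 col_size 1).foldl
    (fun P i => PySem.List.pySetD P i (pvChase tree_mat c_j P (pvVal tree_mat c_j i) i.toNat (i - 1)))
    P0

-- ===== PORT B =====
def nlv_u_alt (tree_mat : List (List Int)) (c_j : Int) (col_size : Int) : List Int :=
  ((PySem.List.pyRange 0 col_size 1).foldl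
    (fun (s : List Int × List Int) i =>
      let stack := s.2.dropWhile (fun j => decide (pvVal tree_mat c_j j < pvVal tree_mat c_j i))
      (s.1 ++ [stack.headD (-1)], i :: stack))
    ([], [])).1

-- ===== PRECONDITION & SPEC =====
-- Pre_ excludes exactly the inputs where A raises an IndexError: for col_size ≥ 2, A reads
-- tree_mat[i][c_j] for every 0 ≤ i < col_size (for col_size ≤ 1 nothing is read: the while test short-circuits).
def Pre_nlv_u (tree_mat : List (List Int)) (c_j : Int) (col_size : Int) : Prop :=
  2 ≤ col_size →
    (col_size ≤ (tree_mat.length : Int) ∧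
     ∀ r ∈ tree_mat.take col_size.toNat, -(r.length : Int) ≤ c_j ∧ c_j < (r.length : Int))
instance (tree_mat : List (List Int)) (c_j : Int) (col_size : Int) : Decidable (Pre_nlv_u tree_mat c_j col_size) := by unfold Pre_nlv_u; infer_instance

def pvWitness_nlv_u : List (List Int) × Int × Int := ([[5, 3], [2, 7], [5, 1]], 0, 3)

def Spec_nlv_u (tree_mat : List (List Int)) (c_j : Int) (col_size : Int) (out : List Int) : Prop := out = nlv_u_alt tree_mat c_j col_size
instance (tree_mat : List (List Int)) (c_j : Int) (col_size : Int) (out : List Int) : Decidable (Spec_nlv_u tree_mat c_j col_size out) := by unfold Spec_nlv_u; infer_instance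

-- ===== CLAIM (what is proved, stated in full; the proofs are below) =====
def Claim_equal_nlv_u : Prop := ∀ (tree_mat : List (List Int)) (c_j : Int) (col_size : Int), Dom_nlv_u tree_mat c_j col_size → Pre_nlv_u tree_mat c_j col_size → Spec_nlv_u tree_mat c_j col_size (nlv_u tree_mat c_j col_size)

-- ===== LEMMAS AND PROOFS =====

-- 'P links the stack': each stack entry's P-value is the next entry (the last one's is -1)
def Linked (P : List Int) : List Int → Prop
  | [] => True
  | [a] => PySem.List.pyGetD P a 0 = -1
  | a :: b :: t => PySem.List.pyGetD P a 0 = b ∧ Linked P (b :: t)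

lemma Linked_tail (P : List Int) (a : Int) (rest : List Int)
    (h : Linked P (a :: rest)) : Linked P rest := by
  cases rest with
  | nil => trivial
  | cons b t => exact h.2

lemma Linked_head (P : List Int) (a : Int) (rest : List Int)
    (h : Linked P (a :: rest)) : PySem.List.pyGetD P a 0 = rest.headD (-1) := by
  cases rest with
  | nil => simpa [Linked] using h
  | cons b t => exact h.1

lemma Linked_dropWhile (P : List Int) (p : Int → Bool) :
    ∀ st, Linked P st → Linked P (st.dropWhile p)
  | [], _ => trivial
  | a :: rest, hL => by
      by_cases h : p a
      · simp only [List.dropWhile_cons, h, if_true]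
        exact Linked_dropWhile P p rest (Linked_tail P a rest hL)
      · simpa [List.dropWhile_cons, h] using hL

lemma pvChase_stop (tree_mat : List (List Int)) (c_j : Int) (P : List Int) (vi j : Int)
    (fuel : Nat) (h : ¬(0 ≤ j ∧ pvVal tree_mat c_j j < vi)) :
    pvChase tree_mat c_j P vi fuel j = j := by
  cases fuel <;> simp [pvChase, h]

lemma pvChase_spec (tree_mat : List (List Int)) (c_j vi : Int) :
    ∀ (st : List Int) (P : List Int) (fuel : Nat), Linked P st → (∀ e ∈ st, 0 ≤ e) →
      st.length ≤ fuel →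
      pvChase tree_mat c_j P vi fuel (st.headD (-1)) =
        (st.dropWhile (fun j => decide (pvVal tree_mat c_j j < vi))).headD (-1)
  | [], P, fuel, _, _, _ => by
      simpa using pvChase_stop tree_mat c_j P vi (-1) fuel (by simp)
  | a :: rest, P, fuel, hL, hnn, hlen => by
      by_cases hv : pvVal tree_mat c_j a < vi
      · have ha : (0 : Int) ≤ a := hnn a (by simp)
        obtain ⟨fuel', rfl⟩ : ∃ f', fuel = f' + 1 := ⟨fuel - 1, by simp at hlen; omega⟩
        have hstep : pvChase tree_mat c_j P vi (fuel' + 1) a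
            = pvChase tree_mat c_j P vi fuel' (PySem.List.pyGetD P a 0) := by
          simp [pvChase, ha, hv]
        rw [List.headD_cons, hstep, Linked_head P a rest hL,
          pvChase_spec tree_mat c_j vi rest P fuel' (Linked_tail P a rest hL)
            (fun e he => hnn e (by simp [he])) (by simp at hlen ⊢; omega)]
        simp [hv]
      · rw [List.headD_cons, pvChase_stop tree_mat c_j P vi a fuel (by tauto)]
        simp [hv]

lemma pyGetD_set_lt (P : List Int) (v : Int) (m : Nat) (e : Int)
    (he0 : 0 ≤ e) (helt : e < (m : Int)) (hm : m < P.length) :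
    PySem.List.pyGetD (P.set m v) e 0 = PySem.List.pyGetD P e 0 := by
  rw [PySem.List.pyGetD_eq_getElem _ 0 he0 (by simp; omega),
      PySem.List.pyGetD_eq_getElem _ 0 he0 (by exact_mod_cast (by omega : e < (P.length : Int)))]
  apply List.getElem_set_ne
  omega

lemma Linked_set (P : List Int) (v : Int) (m : Nat) (hm : m < P.length) :
    ∀ st, (∀ e ∈ st, 0 ≤ e ∧ e < (m : Int)) → Linked P st → Linked (P.set m v) st
  | [], _, _ => trivial
  | [a], hb, hL => by
      have ha := hb a (by simp)
      simpa [Linked, pyGetD_set_lt P v m a ha.1 ha.2 hm] using hL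
  | a :: b :: t, hb, hL => by
      have ha := hb a (by simp)
      refine ⟨?_, Linked_set P v m hm (b :: t) (fun e he => hb e (by simp [he])) hL.2⟩
      rw [pyGetD_set_lt P v m a ha.1 ha.2 hm]
      exact hL.1

lemma Linked_push (P : List Int) (i : Int) (s : List Int)
    (hget : PySem.List.pyGetD P i 0 = s.headD (-1)) (hLs : Linked P s) : Linked P (i :: s) := by
  cases s with
  | nil => simpa [Linked] using hget
  | cons b tl => exact ⟨by simpa using hget, hLs⟩

lemma loop_inv (tree_mat : List (List Int)) (c_j : Int) (n : Nat) :
    ∀ k, k ≤ n →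
    ∃ acc st,
      ((PySem.List.pyRange 0 (k : Int) 1).foldl
          (fun P i => PySem.List.pySetD P i (pvChase tree_mat c_j P (pvVal tree_mat c_j i) i.toNat (i - 1)))
          (List.replicate n (-1)) = acc ++ List.replicate (n - k) (-1))
      ∧ ((PySem.List.pyRange 0 (k : Int) 1).foldl
          (fun (s : List Int × List Int) i =>
            let stack := s.2.dropWhile (fun j => decide (pvVal tree_mat c_j j < pvVal tree_mat c_j i))
            (s.1 ++ [stack.headD (-1)], i :: stack))
          ([], []) = (acc, st))
      ∧ acc.length = k
      ∧ Linked (acc ++ List.replicate (n - k) (-1)) st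
      ∧ (∀ e ∈ st, 0 ≤ e ∧ e < (k : Int))
      ∧ st.length ≤ k
      ∧ st.headD (-1) = (k : Int) - 1 := by
  intro k
  induction k with
  | zero =>
      intro _
      exact ⟨[], [], by simp [PySem.List.pyRange_one_eq_nil], by simp [PySem.List.pyRange_one_eq_nil],
        rfl, trivial, by simp, by simp, by simp⟩
  | succ k ih =>
      intro hk
      obtain ⟨acc, st, hA, hB, hlen, hLink, hbnd, hslen, hhead⟩ := ih (by omega)
      have hPlen : (acc ++ List.replicate (n - k) (-1 : Int)).length = n := by
        simp [hlen]; omega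
      have hk0 : (0 : Int) ≤ (k : Int) := by positivity
      have hrange : PySem.List.pyRange 0 ((k+1 : Nat) : Int) 1
          = PySem.List.pyRange 0 (k : Int) 1 ++ [(k : Int)] := by
        rw [show ((k+1 : Nat) : Int) = (k : Int) + 1 by push_cast; ring,
          PySem.List.pyRange_one_succ_right hk0]
      have hchase : pvChase tree_mat c_j (acc ++ List.replicate (n - k) (-1))
            (pvVal tree_mat c_j (k : Int)) ((k : Int)).toNat ((k : Int) - 1)
          = ((st.dropWhile (fun j => decide (pvVal tree_mat c_j j < pvVal tree_mat c_j (k : Int)))).headD (-1)) := by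
        rw [show ((k : Int) - 1) = st.headD (-1) from hhead.symm, Int.toNat_natCast]
        exact pvChase_spec tree_mat c_j _ st _ k hLink (fun e he => (hbnd e he).1) hslen
      set stack' := st.dropWhile (fun j => decide (pvVal tree_mat c_j j < pvVal tree_mat c_j (k : Int))) with hstackdef
      set t := stack'.headD (-1) with htdef
      have hsetA : PySem.List.pySetD (acc ++ List.replicate (n - k) (-1)) (k : Int) t
          = (acc ++ [t]) ++ List.replicate (n - (k+1)) (-1) := by
        rw [PySem.List.pySetD_of_nonneg _ t hk0, Int.toNat_natCast,
          show List.replicate (n - k) (-1 : Int) = -1 :: List.replicate (n - (k+1)) (-1) by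
            rw [show n - k = (n - (k+1)) + 1 by omega]; rfl,
          ← hlen, List.set_append_right _ _ (le_refl acc.length)]
        simp
      have hget : PySem.List.pyGetD ((acc ++ List.replicate (n - k) (-1)).set k t) (k : Int) 0 = t := by
        rw [PySem.List.pyGetD_eq_getElem _ 0 hk0 (by simp [hPlen]; omega)]
        simp only [Int.toNat_natCast]
        exact List.getElem_set_self (by simp [hPlen]; omega)
      have hsub : ∀ e ∈ stack', e ∈ st := fun e he => (List.dropWhile_sublist _).mem he
      have hLink' : Linked ((acc ++ [t]) ++ List.replicate (n - (k+1)) (-1)) ((k : Int) :: stack') := by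
        rw [← hsetA, PySem.List.pySetD_of_nonneg _ t hk0, Int.toNat_natCast]
        have hLs : Linked ((acc ++ List.replicate (n - k) (-1)).set k t) stack' :=
          Linked_set _ t k (by omega) stack'
            (fun e he => ⟨(hbnd e (hsub e he)).1, (hbnd e (hsub e he)).2⟩)
            (Linked_dropWhile _ _ st hLink)
        exact Linked_push _ _ _ hget hLs
      refine ⟨acc ++ [t], (k : Int) :: stack', ?_, ?_, by simp [hlen], hLink', ?_, ?_, by push_cast; simp⟩
      · rw [hrange, List.foldl_append, hA]
        simp only [List.foldl_cons, List.foldl_nil]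
        rw [hchase, hsetA]
      · rw [hrange, List.foldl_append, hB]
        simp only [List.foldl_cons, List.foldl_nil]
        rfl
      · intro e he
        rcases List.mem_cons.mp he with rfl | he'
        · exact ⟨hk0, by push_cast; omega⟩
        · have := hbnd e (hsub e he')
          exact ⟨this.1, by push_cast; omega⟩
      · have := List.length_dropWhile_le (fun j => decide (pvVal tree_mat c_j j < pvVal tree_mat c_j (k : Int))) st
        simp only [List.length_cons, hstackdef]
        omega

-- ===== VERDICT (by name: the statement is the Claim_ definition above) =====
theorem nlv_u_spec : Claim_equal_nlv_u := by
  intro tree_mat c_j col_size _ _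
  unfold Spec_nlv_u
  simp only [nlv_u, nlv_u_alt]
  by_cases hcs : col_size ≤ 0
  · rw [PySem.List.pyRange_one_eq_nil hcs]; simp
  · obtain ⟨n, rfl⟩ : ∃ n : Nat, col_size = (n : Int) := ⟨col_size.toNat, by omega⟩
    obtain ⟨acc, st, hA, hB, -⟩ := loop_inv tree_mat c_j n n le_rfl
    have hP0 : (PySem.List.pyRange 0 (n : Int) 1).map (fun _ => (-1 : Int)) = List.replicate n (-1) := by
      rw [show (fun (_ : Int) => (-1 : Int)) = Function.const Int (-1) from rfl, List.map_const,
        PySem.List.length_pyRange_one]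
      simp
    rw [hP0, hA, hB]
    simp
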